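-- pv_equiv track=rewrite | github.com/graham-hughes-code/pyflow | pyflow/parse.py | build_full_chart
-- ===== SOURCE A (Python) =====
-- def build_full_chart(mermaid_map, orientation):
--   '''
--   combines individual flow charts
--
--   Args:
--     mermaid_map (Dict): function name: flow chart
--     orientation (str): the orientation of the chart
--
--   Returns:
--     complied flow chart
--   '''
--
--   header = f'flowchart {orientation}\n'
--
--   function_names = list(mermaid_map.keys())
--
--   strip_joins_mermaid_map = {}
--   function_joins = []
--
--   for fn, fc in mermaid_map.items():
--     new_fc = []
--     for line in fc.splitlines():
--       skip_line = False
--       for function_name in function_names: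
--         if function_name in line and f'{function_name}()' not in line:
--           skip_line = True
--           function_joins.append(line)
--       if not skip_line:
--         new_fc.append(line)
--     strip_joins_mermaid_map[fn] = '\n'.join(new_fc)
--
--   mermaid_map = strip_joins_mermaid_map
--
--   subgraphs = [
--     f'subgraph {fn}{fc}\nend'
--     for fn, fc in mermaid_map.items()
--   ]
--
--   subgraphs_str = "\n".join(subgraphs)
--
--   function_joins_str = '\n'.join(function_joins)
--
--   return f'{header}{subgraphs_str}\n{function_joins_str}'
-- ===== SOURCE B (Python) =====
-- def build_full_chart(mermaid_map, orientation):
--   '''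
--   Combines individual flow charts.
--
--   Scans each line once, position by position, looking up candidate substrings
--   in a hash set of function names (one probe per distinct name length), instead
--   of testing every function name against every line.  A line referencing
--   another function is moved, once, to the list of cross-function joins.
--   '''
--   names = set(mermaid_map)
--   lengths = sorted({len(n) for n in names})
--
--   def referenced(line):
--     found, called = set(), set()
--     for i in range(len(line) + 1):
--       for L in lengths:
--         w = line[i:i+L]
--         if w in names:
--           found.add(w)
--           if line[i+L:i+L+2] == '()':
--             called.add(w)
--     return found - called
--
--   joins = []
--   subgraphs = []
--   for fn, fc in mermaid_map.items():
--     kept = []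
--     for line in fc.splitlines():
--       (joins if referenced(line) else kept).append(line)
--     subgraphs.append('subgraph ' + fn + '\n'.join(kept) + '\nend')
--
--   return ('flowchart ' + orientation + '\n'
--           + '\n'.join(subgraphs) + '\n' + '\n'.join(joins))
-- ===== Notes on version B (the rewrite author's own statement) =====
-- stated objective: faster
-- what changed: Instead of testing every function name against every line (per-name substring searches with a skip flag and an intermediate stripped dict), B scans each line once position by position, probing a hash set of names with the slice at each of the distinct name lengths, and classifies the line as kept or cross-function join in a single pass; Pre_ excludes association lists with a repeated function name, which correspond to no Python dict input.
-- intended difference: On maps where some line matches >= 2 function names, A appends that join line once per matching name, duplicating it in the combined chart, while B emits each join line once, which is the intended output. — e.g. on build_full_chart([("a", "x\nab"), ("b", "")], "TD"): A returns "flowchart TD\nsubgraph ax\nend\nsubgraph b\nend\nab\nab", B returns "flowchart TD\nsubgraph ax\nend\nsubgraph b\nend\nab"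
import Mathlib
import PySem

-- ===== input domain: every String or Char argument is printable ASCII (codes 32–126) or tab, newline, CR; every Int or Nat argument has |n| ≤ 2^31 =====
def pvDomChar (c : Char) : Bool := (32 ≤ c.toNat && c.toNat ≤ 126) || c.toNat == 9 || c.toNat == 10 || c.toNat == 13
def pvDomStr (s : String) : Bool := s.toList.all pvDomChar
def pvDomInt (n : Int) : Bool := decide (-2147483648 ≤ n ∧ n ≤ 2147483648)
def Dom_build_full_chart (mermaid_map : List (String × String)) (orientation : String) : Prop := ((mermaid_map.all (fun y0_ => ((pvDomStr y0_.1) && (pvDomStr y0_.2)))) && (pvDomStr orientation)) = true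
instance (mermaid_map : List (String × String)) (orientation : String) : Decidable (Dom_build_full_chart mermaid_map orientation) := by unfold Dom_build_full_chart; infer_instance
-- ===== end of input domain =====

-- B replaces A's per-name substring tests with a single positional scan of each line
-- that hashes candidate slices against the set of function names (one set probe per
-- distinct name length), and records each cross-function join line once; A emits a
-- join line once per matching name, which duplicates it when a line matches ≥ 2 names
-- (stated as the intended difference D_ below).

-- ===== PORT A =====
-- the test 'function_name in line and f'{function_name}()' not in line'
def pvCond (function_name line : String) : Bool :=
  PySem.Str.isIn function_name line && !(PySem.Str.isIn (function_name ++ "()") line)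

def build_full_chart (mermaid_map : List (String × String)) (orientation : String) : String :=
  let header := "flowchart " ++ orientation ++ "\n"
  let function_names := mermaid_map.map Prod.fst
  -- the main loop carries (strip_joins_mermaid_map, function_joins)
  let st := mermaid_map.foldl
    (fun (st : PySem.Dict String String × List String) p =>
      let inner := (PySem.Str.splitlines p.2).foldl
        (fun (st2 : List String × List String) line =>
          let r := function_names.foldl
            (fun (st3 : Bool × List String) function_name =>
              if pvCond function_name line then (true, st3.2 ++ [line]) else st3)
            (false, st2.2)
          if r.1 then (st2.1, r.2) else (st2.1 ++ [line], r.2))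
        ([], st.2)
      (st.1.insert p.1 (PySem.Str.join "\n" inner.1), inner.2))
    (PySem.Dict.empty, [])
  let subgraphs := st.1.items.map (fun p => "subgraph " ++ p.1 ++ p.2 ++ "\nend")
  let subgraphs_str := PySem.Str.join "\n" subgraphs
  let function_joins_str := PySem.Str.join "\n" st.2
  header ++ subgraphs_str ++ "\n" ++ function_joins_str

-- ===== PORT B =====
-- referenced(line) of Source B: scan every position of the line, probe the name set with
-- the slice of each name length; returns the set of referenced (not called) names.
-- pvScanStep is the body of the innermost loop (one candidate length at one position).
def pvScanStep (names : PySem.Set String) (line : String) (i : Int)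
    (st2 : PySem.Set String × PySem.Set String) (L : Int) :
    PySem.Set String × PySem.Set String :=
  let w := PySem.Str.slice line (some i) (some (i + L))
  if names.contains w then
    (st2.1.add w,
     if PySem.Str.slice line (some (i + L)) (some (i + L + 2)) == "()" then st2.2.add w
     else st2.2)
  else st2

def pvReferenced (names : PySem.Set String) (lengths : List Int) (line : String) :
    PySem.Set String :=
  let st := (PySem.List.pyRange 0 (PySem.Str.len line + 1)).foldl
    (fun st i => lengths.foldl (pvScanStep names line i) st)
    (PySem.Set.empty, PySem.Set.empty)
  st.1.diff st.2

def build_full_chart_alt (mermaid_map : List (String × String)) (orientation : String) : String :=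
  let names : PySem.Set String := PySem.Set.ofList (mermaid_map.map Prod.fst)
  let lengths : List Int :=
    PySem.List.sorted (PySem.Set.ofList (names.map (fun n => PySem.Str.len n))) (fun x => x)
  -- the loop carries (joins, subgraphs)
  let st := mermaid_map.foldl
    (fun (st : List String × List String) p =>
      let inner := (PySem.Str.splitlines p.2).foldl
        (fun (st2 : List String × List String) line =>
          if (pvReferenced names lengths line).isEmpty then (st2.1, st2.2 ++ [line])
          else (st2.1 ++ [line], st2.2))
        (st.1, [])
      (inner.1, st.2 ++ ["subgraph " ++ p.1 ++ PySem.Str.join "\n" inner.2 ++ "\nend"]))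
    ([], [])
  "flowchart " ++ orientation ++ "\n" ++ PySem.Str.join "\n" st.2 ++ "\n" ++
    PySem.Str.join "\n" st.1

-- ===== PRECONDITION & SPEC =====
-- Pre_ excludes association lists with a repeated function name: a Python dict cannot
-- carry duplicate keys, so such lists correspond to no input of the Python programs
-- (A's in-place dict overwrite and B's per-entry pass are both accidental there).
def Pre_build_full_chart (mermaid_map : List (String × String)) (_orientation : String) : Prop :=
  (mermaid_map.map Prod.fst).Nodup

instance (mermaid_map : List (String × String)) (orientation : String) : Decidable (Pre_build_full_chart mermaid_map orientation) := by unfold Pre_build_full_chart; infer_instance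

def pvWitness_build_full_chart : (List (String × String)) × String :=
  ([("f", "a-->b"), ("g", "c-->f()")], "TD")

-- On maps where some line of some chart matches ≥ 2 function names, A appends that join
-- line once per matching name (duplicating it in the output) while B emits it once;
-- one copy of each cross-function join line is the intended output.
def D_build_full_chart (mermaid_map : List (String × String)) (orientation : String) : Prop :=
  ∃ p ∈ mermaid_map, ∃ line ∈ PySem.Str.splitlines p.2,
    2 ≤ ((mermaid_map.map Prod.fst).filter
          (fun n => PySem.Str.isIn n line && !(PySem.Str.isIn (n ++ "()") line))).length

instance (mermaid_map : List (String × String)) (orientation : String) : Decidable (D_build_full_chart mermaid_map orientation) := by unfold D_build_full_chart; infer_instance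

def Spec_build_full_chart (mermaid_map : List (String × String)) (orientation : String) (out : String) : Prop := ¬ D_build_full_chart mermaid_map orientation → out = build_full_chart_alt mermaid_map orientation
instance (mermaid_map : List (String × String)) (orientation : String) (out : String) : Decidable (Spec_build_full_chart mermaid_map orientation out) := by unfold Spec_build_full_chart; infer_instance

def pvDiffWitness_build_full_chart : (List (String × String)) × String :=
  ([("a", "x\nab"), ("b", "")], "TD")

def pvDiffWitnessOut_build_full_chart : String × String :=
  ("flowchart TD\nsubgraph ax\nend\nsubgraph b\nend\nab\nab",
   "flowchart TD\nsubgraph ax\nend\nsubgraph b\nend\nab")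

-- ===== CLAIM (what is proved, stated in full; the proofs are below) =====
def Claim_unchanged_build_full_chart : Prop := ∀ (mermaid_map : List (String × String)) (orientation : String), Dom_build_full_chart mermaid_map orientation → Pre_build_full_chart mermaid_map orientation → Spec_build_full_chart mermaid_map orientation (build_full_chart mermaid_map orientation)

def Claim_changed_build_full_chart : Prop := Dom_build_full_chart (pvDiffWitness_build_full_chart.1) (pvDiffWitness_build_full_chart.2) ∧ Pre_build_full_chart (pvDiffWitness_build_full_chart.1) (pvDiffWitness_build_full_chart.2) ∧ D_build_full_chart (pvDiffWitness_build_full_chart.1) (pvDiffWitness_build_full_chart.2) ∧ build_full_chart (pvDiffWitness_build_full_chart.1) (pvDiffWitness_build_full_chart.2) = pvDiffWitnessOut_build_full_chart.1 ∧ build_full_chart_alt (pvDiffWitness_build_full_chart.1) (pvDiffWitness_build_full_chart.2) = pvDiffWitnessOut_build_full_chart.2 ∧ pvDiffWitnessOut_build_full_chart.1 ≠ pvDiffWitnessOut_build_full_chart.2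

def Claim_exact_build_full_chart : Prop := ∀ (mermaid_map : List (String × String)) (orientation : String), Dom_build_full_chart mermaid_map orientation → Pre_build_full_chart mermaid_map orientation → D_build_full_chart mermaid_map orientation → build_full_chart mermaid_map orientation ≠ build_full_chart_alt mermaid_map orientation

-- ===== LEMMAS AND PROOFS =====

-- A's matched-name list for one line
def pvMatches (names : List String) (line : String) : List String :=
  names.filter (fun n => pvCond n line)

-- ---------- A-side: collapse A's three nested loops ----------

theorem pv_inner_names (line : String) (names : List String) (b : Bool) (acc : List String) :
    names.foldl
      (fun (st3 : Bool × List String) function_name =>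
        if pvCond function_name line then (true, st3.2 ++ [line]) else st3)
      (b, acc)
    = (b || !(pvMatches names line).isEmpty,
       acc ++ (pvMatches names line).map (fun _ => line)) := by
  induction names generalizing b acc with
  | nil => simp [pvMatches]
  | cons n rest ih =>
    by_cases h : pvCond n line = true
    · simp [pvMatches, h, ih]
    · simp only [Bool.not_eq_true] at h
      simp [pvMatches, h, ih]

def pvLineStep (names : List String) (st2 : List String × List String)
    (line : String) : List String × List String :=
  if !(pvMatches names line).isEmpty then
    (st2.1, st2.2 ++ (pvMatches names line).map (fun _ => line))
  else
    (st2.1 ++ [line], st2.2 ++ (pvMatches names line).map (fun _ => line))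

theorem pv_line_step_eq (names : List String) :
    (fun (st2 : List String × List String) line =>
      let r := names.foldl
        (fun (st3 : Bool × List String) function_name =>
          if pvCond function_name line then (true, st3.2 ++ [line]) else st3)
        (false, st2.2)
      if r.1 then (st2.1, r.2) else (st2.1 ++ [line], r.2))
    = pvLineStep names := by
  funext st2 line
  simp only [pv_inner_names, Bool.false_or]
  rfl

theorem pv_line_loop (names : List String) (lines : List String)
    (kept joins : List String) :
    lines.foldl (pvLineStep names) (kept, joins)
    = (kept ++ lines.filter (fun l => (pvMatches names l).isEmpty),
       joins ++ lines.flatMap (fun l => (pvMatches names l).map (fun _ => l))) := by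
  induction lines generalizing kept joins with
  | nil => simp
  | cons line rest ih =>
    rw [List.foldl_cons]
    cases h : (pvMatches names line).isEmpty with
    | true =>
      have hnil : pvMatches names line = [] := List.isEmpty_iff.mp h
      have hstep : pvLineStep names (kept, joins) line = (kept ++ [line], joins) := by
        simp [pvLineStep, hnil]
      rw [hstep, ih]
      simp [hnil, List.append_assoc]
    | false =>
      have hstep : pvLineStep names (kept, joins) line
          = (kept, joins ++ (pvMatches names line).map (fun _ => line)) := by
        simp [pvLineStep, h]
      rw [hstep, ih]
      simp [h, List.flatMap_cons, List.append_assoc]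

def pvStep (names : List String) (st : PySem.Dict String String × List String)
    (p : String × String) : PySem.Dict String String × List String :=
  (st.1.insert p.1 (PySem.Str.join "\n"
      ((PySem.Str.splitlines p.2).filter (fun l => (pvMatches names l).isEmpty))),
   st.2 ++ (PySem.Str.splitlines p.2).flatMap (fun l => (pvMatches names l).map (fun _ => l)))

theorem pv_step_eq (names : List String) :
    (fun (st : PySem.Dict String String × List String) (p : String × String) =>
      let inner := (PySem.Str.splitlines p.2).foldl
        (fun (st2 : List String × List String) line =>
          let r := names.foldl
            (fun (st3 : Bool × List String) function_name =>
              if pvCond function_name line then (true, st3.2 ++ [line]) else st3)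
            (false, st2.2)
          if r.1 then (st2.1, r.2) else (st2.1 ++ [line], r.2))
        ([], st.2)
      (st.1.insert p.1 (PySem.Str.join "\n" inner.1), inner.2))
    = pvStep names := by
  funext st p
  simp only [pv_line_step_eq, pv_line_loop, List.nil_append]
  rfl

theorem pv_outer_loop (names : List String) (todo : List (String × String))
    (d : PySem.Dict String String) (joins : List String)
    (hfresh : ∀ p ∈ todo, d.contains p.1 = false)
    (hnodup : (todo.map Prod.fst).Nodup) :
    todo.foldl (pvStep names) (d, joins)
    = (PySem.Dict.mk (d.items ++ todo.map (fun p =>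
          (p.1, PySem.Str.join "\n"
            ((PySem.Str.splitlines p.2).filter (fun l => (pvMatches names l).isEmpty))))),
       joins ++ todo.flatMap (fun p =>
         (PySem.Str.splitlines p.2).flatMap (fun l =>
           (pvMatches names l).map (fun _ => l)))) := by
  induction todo generalizing d joins with
  | nil => cases d; simp
  | cons p rest ih =>
    rw [List.foldl_cons]
    have hfree : d.contains p.1 = false := hfresh p (by simp)
    have hfresh' : ∀ q ∈ rest, ((pvStep names (d, joins) p).1).contains q.1 = false := by
      intro q hq
      show (d.insert p.1 _).contains q.1 = false
      rw [PySem.Dict.contains_insert]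
      have h1 : q.1 ≠ p.1 := by
        intro he
        exact (List.nodup_cons.1 hnodup).1 (he ▸ (List.mem_map.2 ⟨q, hq, rfl⟩))
      have h2 : d.contains q.1 = false := hfresh q (List.mem_cons_of_mem _ hq)
      simp [h1, h2]
    have hpair : pvStep names (d, joins) p
        = ((pvStep names (d, joins) p).1, (pvStep names (d, joins) p).2) := rfl
    rw [hpair, ih _ _ hfresh' (List.nodup_cons.1 hnodup).2]
    have hins : ((pvStep names (d, joins) p).1).items
        = d.items ++ [(p.1, PySem.Str.join "\n"
            ((PySem.Str.splitlines p.2).filter (fun l => (pvMatches names l).isEmpty)))] :=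
      PySem.Dict.items_insert_of_not_contains d _ hfree
    rw [hins]
    simp [pvStep, List.append_assoc]

-- ---------- B-side: characterise the positional scan ----------

theorem pv_scan_inner (line : String) (names : PySem.Set String) (lengths : List Int)
    (i : Int) (st : PySem.Set String × PySem.Set String) (n : String) :
    (n ∈ (lengths.foldl (pvScanStep names line i) st).1
      ↔ n ∈ st.1 ∨ (names.contains n = true ∧
          ∃ L ∈ lengths, PySem.Str.slice line (some i) (some (i + L)) = n))
    ∧ (n ∈ (lengths.foldl (pvScanStep names line i) st).2
      ↔ n ∈ st.2 ∨ (names.contains n = true ∧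
          ∃ L ∈ lengths, PySem.Str.slice line (some i) (some (i + L)) = n ∧
            PySem.Str.slice line (some (i + L)) (some (i + L + 2)) = "()")) := by
  induction lengths generalizing st with
  | nil => simp
  | cons L rest ih =>
    rw [List.foldl_cons]
    obtain ⟨ih1, ih2⟩ := ih (pvScanStep names line i st L)
    rw [ih1, ih2]
    by_cases h : names.contains (PySem.Str.slice line (some i) (some (i + L))) = true
    · by_cases hq : (PySem.Str.slice line (some (i + L)) (some (i + L + 2)) == "()") = true
      · have hstep : pvScanStep names line i st L
            = (st.1.add (PySem.Str.slice line (some i) (some (i + L))),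
               st.2.add (PySem.Str.slice line (some i) (some (i + L)))) := by
          show (if names.contains (PySem.Str.slice line (some i) (some (i + L))) = true then _ else _) = _
          rw [if_pos h, if_pos hq]
        rw [hstep]
        have hq' : PySem.Str.slice line (some (i + L)) (some (i + L + 2)) = "()" := by simpa using hq
        simp only [PySem.Set.mem_add]
        constructor
        · constructor
          · rintro ((hs | he) | ⟨hc, L', hL', hs⟩)
            · exact Or.inl hs
            · exact Or.inr ⟨he ▸ h, L, List.mem_cons_self .., he.symm⟩
            · exact Or.inr ⟨hc, L', List.mem_cons_of_mem _ hL', hs⟩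
          · rintro (hs | ⟨hc, L', hL', hs⟩)
            · exact Or.inl (Or.inl hs)
            · rcases List.mem_cons.1 hL' with rfl | hL''
              · exact Or.inl (Or.inr hs.symm)
              · exact Or.inr ⟨hc, L', hL'', hs⟩
        · constructor
          · rintro ((hs | he) | ⟨hc, L', hL', hs, hp⟩)
            · exact Or.inl hs
            · exact Or.inr ⟨he ▸ h, L, List.mem_cons_self .., he.symm, hq'⟩
            · exact Or.inr ⟨hc, L', List.mem_cons_of_mem _ hL', hs, hp⟩
          · rintro (hs | ⟨hc, L', hL', hs, hp⟩)
            · exact Or.inl (Or.inl hs)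
            · rcases List.mem_cons.1 hL' with rfl | hL''
              · exact Or.inl (Or.inr hs.symm)
              · exact Or.inr ⟨hc, L', hL'', hs, hp⟩
      · have hstep : pvScanStep names line i st L
            = (st.1.add (PySem.Str.slice line (some i) (some (i + L))), st.2) := by
          show (if names.contains (PySem.Str.slice line (some i) (some (i + L))) = true then _ else _) = _
          rw [if_pos h, if_neg hq]
        rw [hstep]
        have hq' : PySem.Str.slice line (some (i + L)) (some (i + L + 2)) ≠ "()" := by
          simpa using hq
        simp only [PySem.Set.mem_add]
        constructor
        · constructor
          · rintro ((hs | he) | ⟨hc, L', hL', hs⟩)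
            · exact Or.inl hs
            · exact Or.inr ⟨he ▸ h, L, List.mem_cons_self .., he.symm⟩
            · exact Or.inr ⟨hc, L', List.mem_cons_of_mem _ hL', hs⟩
          · rintro (hs | ⟨hc, L', hL', hs⟩)
            · exact Or.inl (Or.inl hs)
            · rcases List.mem_cons.1 hL' with rfl | hL''
              · exact Or.inl (Or.inr hs.symm)
              · exact Or.inr ⟨hc, L', hL'', hs⟩
        · constructor
          · rintro (hs | ⟨hc, L', hL', hs, hp⟩)
            · exact Or.inl hs
            · exact Or.inr ⟨hc, L', List.mem_cons_of_mem _ hL', hs, hp⟩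
          · rintro (hs | ⟨hc, L', hL', hs, hp⟩)
            · exact Or.inl hs
            · rcases List.mem_cons.1 hL' with rfl | hL''
              · exact absurd hp hq'
              · exact Or.inr ⟨hc, L', hL'', hs, hp⟩
    · have hstep : pvScanStep names line i st L = st := by
        show (if names.contains (PySem.Str.slice line (some i) (some (i + L))) = true then _ else _) = _
        rw [if_neg h]
      rw [hstep]
      constructor
      · constructor
        · rintro (hs | ⟨hc, L', hL', hs⟩)
          · exact Or.inl hs
          · exact Or.inr ⟨hc, L', List.mem_cons_of_mem _ hL', hs⟩
        · rintro (hs | ⟨hc, L', hL', hs⟩)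
          · exact Or.inl hs
          · rcases List.mem_cons.1 hL' with rfl | hL''
            · exact absurd (hs ▸ hc) h
            · exact Or.inr ⟨hc, L', hL'', hs⟩
      · constructor
        · rintro (hs | ⟨hc, L', hL', hs, hp⟩)
          · exact Or.inl hs
          · exact Or.inr ⟨hc, L', List.mem_cons_of_mem _ hL', hs, hp⟩
        · rintro (hs | ⟨hc, L', hL', hs, hp⟩)
          · exact Or.inl hs
          · rcases List.mem_cons.1 hL' with rfl | hL''
            · exact absurd (hs ▸ hc) h
            · exact Or.inr ⟨hc, L', hL'', hs, hp⟩

theorem pv_scan_outer (line : String) (names : PySem.Set String) (lengths : List Int)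
    (is : List Int) (st : PySem.Set String × PySem.Set String) (n : String) :
    (n ∈ (is.foldl (fun st i => lengths.foldl (pvScanStep names line i) st) st).1
      ↔ n ∈ st.1 ∨ (names.contains n = true ∧
          ∃ i ∈ is, ∃ L ∈ lengths, PySem.Str.slice line (some i) (some (i + L)) = n))
    ∧ (n ∈ (is.foldl (fun st i => lengths.foldl (pvScanStep names line i) st) st).2
      ↔ n ∈ st.2 ∨ (names.contains n = true ∧
          ∃ i ∈ is, ∃ L ∈ lengths, PySem.Str.slice line (some i) (some (i + L)) = n ∧
            PySem.Str.slice line (some (i + L)) (some (i + L + 2)) = "()")) := by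
  induction is generalizing st with
  | nil => simp
  | cons i rest ih =>
    rw [List.foldl_cons]
    obtain ⟨ih1, ih2⟩ := ih (lengths.foldl (pvScanStep names line i) st)
    obtain ⟨hi1, hi2⟩ := pv_scan_inner line names lengths i st n
    rw [ih1, ih2, hi1, hi2]
    constructor
    · constructor
      · rintro ((hs | ⟨hc, L', hL', hsl⟩) | ⟨hc, i', hi', L', hL', hsl⟩)
        · exact Or.inl hs
        · exact Or.inr ⟨hc, i, List.mem_cons_self .., L', hL', hsl⟩
        · exact Or.inr ⟨hc, i', List.mem_cons_of_mem _ hi', L', hL', hsl⟩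
      · rintro (hs | ⟨hc, i', hi', L', hL', hsl⟩)
        · exact Or.inl (Or.inl hs)
        · rcases List.mem_cons.1 hi' with rfl | hi''
          · exact Or.inl (Or.inr ⟨hc, L', hL', hsl⟩)
          · exact Or.inr ⟨hc, i', hi'', L', hL', hsl⟩
    · constructor
      · rintro ((hs | ⟨hc, L', hL', hsl⟩) | ⟨hc, i', hi', L', hL', hsl⟩)
        · exact Or.inl hs
        · exact Or.inr ⟨hc, i, List.mem_cons_self .., L', hL', hsl⟩
        · exact Or.inr ⟨hc, i', List.mem_cons_of_mem _ hi', L', hL', hsl⟩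
      · rintro (hs | ⟨hc, i', hi', L', hL', hsl⟩)
        · exact Or.inl (Or.inl hs)
        · rcases List.mem_cons.1 hi' with rfl | hi''
          · exact Or.inl (Or.inr ⟨hc, L', hL', hsl⟩)
          · exact Or.inr ⟨hc, i', hi'', L', hL', hsl⟩

-- slice with nonneg Int bounds, as a take/drop on the character list
theorem pv_slice_toList (line : String) (i L : Int) (h0 : 0 ≤ i) (h1 : 0 ≤ L) :
    (PySem.Str.slice line (some i) (some (i + L))).toList
      = List.take L.toNat (List.drop i.toNat line.toList) := by
  rw [PySem.Str.toList_slice, PySem.Chars.slice_eq_listSlice,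
    PySem.List.slice_toNat _ h0 (by omega)]
  congr 1
  omega

theorem pv_found_iff (line n : String) (lengths : List Int)
    (hlen : (n.toList.length : Int) ∈ lengths) (hpos : ∀ L ∈ lengths, 0 ≤ L) :
    (∃ i ∈ PySem.List.pyRange 0 (PySem.Str.len line + 1),
        ∃ L ∈ lengths, PySem.Str.slice line (some i) (some (i + L)) = n)
      ↔ PySem.Str.isIn n line = true := by
  constructor
  · rintro ⟨i, hi, L, hL, hs⟩
    obtain ⟨h0, _⟩ := PySem.List.mem_pyRange_one.1 hi
    have hsl := congrArg String.toList hs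
    rw [pv_slice_toList line i L h0 (hpos L hL)] at hsl
    rw [PySem.Str.isIn_eq, ← PySem.Chars.exists_prefix_drop_iff_isIn]
    exact ⟨i.toNat, hsl ▸ List.take_prefix _ _⟩
  · intro h
    rw [PySem.Str.isIn_eq, ← PySem.Chars.exists_prefix_drop_iff_isIn] at h
    obtain ⟨j, hj⟩ := h
    have hj' : n.toList <+: line.toList.drop (min j line.toList.length) := by
      rcases le_or_gt j line.toList.length with hle | hgt
      · rw [min_eq_left hle]; exact hj
      · have : line.toList.drop j = [] := by
          rw [List.drop_eq_nil_iff]; exact le_of_lt hgt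
        rw [this] at hj
        have : n.toList = [] := List.prefix_nil.mp hj
        simp [this]
    have hjle : min j line.toList.length ≤ line.toList.length := min_le_right _ _
    refine ⟨((min j line.toList.length : Nat) : Int), ?_, (n.toList.length : Int), hlen, ?_⟩
    · rw [PySem.List.mem_pyRange_one, PySem.Str.len_eq]
      constructor
      · positivity
      · omega
    · apply String.toList_inj.mp
      rw [pv_slice_toList line _ _ (by positivity) (by positivity)]
      have := List.prefix_iff_eq_take.mp hj'
      simp only [Int.toNat_natCast]
      exact this.symm

theorem pv_called_iff (line n : String) (lengths : List Int)
    (hlen : (n.toList.length : Int) ∈ lengths) (hpos : ∀ L ∈ lengths, 0 ≤ L) :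
    (∃ i ∈ PySem.List.pyRange 0 (PySem.Str.len line + 1),
        ∃ L ∈ lengths, PySem.Str.slice line (some i) (some (i + L)) = n ∧
          PySem.Str.slice line (some (i + L)) (some (i + L + 2)) = "()")
      ↔ PySem.Str.isIn (n ++ "()") line = true := by
  have hparen : ("()" : String).toList = ['(', ')'] := by decide
  constructor
  · rintro ⟨i, hi, L, hL, hs, hp⟩
    obtain ⟨h0, _⟩ := PySem.List.mem_pyRange_one.1 hi
    have hL0 := hpos L hL
    have hsl := congrArg String.toList hs
    rw [pv_slice_toList line i L h0 hL0] at hsl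
    have hpl := congrArg String.toList hp
    have h2 : PySem.Str.slice line (some (i + L)) (some (i + L + 2))
        = PySem.Str.slice line (some (i + L)) (some ((i + L) + (2:Int))) := by ring_nf
    rw [h2, pv_slice_toList line (i + L) 2 (by omega) (by omega)] at hpl
    rw [hparen] at hpl
    rw [show ((2:Int).toNat) = 2 from rfl] at hpl
    have hiL : (i + L).toNat = i.toNat + L.toNat := Int.toNat_add h0 hL0
    rw [hiL] at hpl
    have htk : List.take (L.toNat + 2) (List.drop i.toNat line.toList)
        = (n ++ "()").toList := by
      rw [List.take_add, List.drop_drop, String.toList_append, hparen, hsl, hpl]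
    rw [PySem.Str.isIn_eq, ← PySem.Chars.exists_prefix_drop_iff_isIn]
    exact ⟨i.toNat, htk ▸ List.take_prefix _ _⟩
  · intro h
    rw [PySem.Str.isIn_eq, ← PySem.Chars.exists_prefix_drop_iff_isIn] at h
    obtain ⟨j, hj⟩ := h
    rw [String.toList_append, hparen] at hj
    obtain ⟨r, hr⟩ := hj
    have hlen' : line.toList.length - j = n.toList.length + 2 + r.length := by
      have h := congrArg List.length hr
      simp only [List.length_drop, List.length_append, List.length_cons,
        List.length_nil] at h
      omega
    have hjle : j + n.toList.length + 2 ≤ line.toList.length := by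
      rcases le_or_gt j line.toList.length with hle | hgt
      · omega
      · exfalso
        have : line.toList.drop j = [] := by
          rw [List.drop_eq_nil_iff]; exact le_of_lt hgt
        rw [this] at hr
        simp at hr
    have hdropj : List.drop j line.toList = n.toList ++ (['(', ')'] ++ r) := by
      rw [← hr, List.append_assoc]
    refine ⟨(j : Int), ?_, (n.toList.length : Int), hlen, ?_, ?_⟩
    · rw [PySem.List.mem_pyRange_one, PySem.Str.len_eq]
      constructor
      · positivity
      · omega
    · apply String.toList_inj.mp
      rw [pv_slice_toList line _ _ (by positivity) (by positivity)]
      simp only [Int.toNat_natCast]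
      rw [hdropj, List.take_left]
    · apply String.toList_inj.mp
      have h2 : PySem.Str.slice line (some ((j:Int) + (n.toList.length:Int)))
            (some ((j:Int) + (n.toList.length:Int) + 2))
          = PySem.Str.slice line (some ((j:Int) + (n.toList.length:Int)))
            (some (((j:Int) + (n.toList.length:Int)) + (2:Int))) := by ring_nf
      rw [h2, pv_slice_toList line _ 2 (by positivity) (by omega)]
      have hiL : ((j:Int) + (n.toList.length:Int)).toNat = j + n.toList.length := by
        omega
      rw [hiL, hparen, ← List.drop_drop, hdropj, List.drop_left]
      show List.take (['(', ')'] : List Char).length (['(', ')'] ++ r) = _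
      rw [List.take_left]

-- B's length table: the sorted set of name lengths
def pvLengths (ns : List String) : List Int :=
  PySem.List.sorted
    (PySem.Set.ofList ((PySem.Set.ofList ns).map (fun n => PySem.Str.len n))) (fun x => x)

theorem pv_lengths_mem (ns : List String) (n : String) (h : n ∈ ns) :
    ((n.toList.length : Int)) ∈ pvLengths ns := by
  unfold pvLengths
  rw [PySem.List.mem_sorted]
  rw [PySem.Set.mem_ofList]
  exact List.mem_map.2 ⟨n, (PySem.Set.mem_ofList ns n).2 h, (by simp [PySem.Str.len_eq])⟩

theorem pv_lengths_pos (ns : List String) : ∀ L ∈ pvLengths ns, 0 ≤ L := by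
  intro L hL
  unfold pvLengths at hL
  rw [PySem.List.mem_sorted, PySem.Set.mem_ofList] at hL
  obtain ⟨n, _, rfl⟩ := List.mem_map.1 hL
  rw [PySem.Str.len_eq]
  positivity

theorem pv_referenced_mem (ns : List String) (line n : String) :
    n ∈ pvReferenced (PySem.Set.ofList ns) (pvLengths ns) line
      ↔ n ∈ pvMatches ns line := by
  unfold pvReferenced
  rw [PySem.Set.mem_diff]
  obtain ⟨h1, h2⟩ := pv_scan_outer line (PySem.Set.ofList ns) (pvLengths ns)
    (PySem.List.pyRange 0 (PySem.Str.len line + 1)) (PySem.Set.empty, PySem.Set.empty) n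
  rw [h1, h2]
  have hC : ((PySem.Set.ofList ns).contains n = true) ↔ n ∈ ns := by
    show (List.contains _ n = true) ↔ _
    rw [List.contains_iff_mem]
    exact PySem.Set.mem_ofList ns n
  have hempty : n ∉ (PySem.Set.empty : PySem.Set String) := by
    simp [PySem.Set.empty]
  by_cases hmem : n ∈ ns
  · have hfound := pv_found_iff line n (pvLengths ns) (pv_lengths_mem ns n hmem)
      (pv_lengths_pos ns)
    have hcalled := pv_called_iff line n (pvLengths ns) (pv_lengths_mem ns n hmem)
      (pv_lengths_pos ns)
    constructor
    · rintro ⟨(h | ⟨_, hocc⟩), hnc⟩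
      · exact absurd h hempty
      · refine List.mem_filter.2 ⟨hmem, ?_⟩
        have hin : PySem.Str.isIn n line = true := hfound.1 hocc
        have hnotc : PySem.Str.isIn (n ++ "()") line = false := by
          cases hval : PySem.Str.isIn (n ++ "()") line with
          | false => rfl
          | true => exact absurd (Or.inr ⟨hC.2 hmem, hcalled.2 hval⟩) hnc
        unfold pvCond
        rw [hin, hnotc]
        rfl
    · intro h
      obtain ⟨_, hcond⟩ := List.mem_filter.1 h
      have hin : PySem.Str.isIn n line = true := by
        cases hv : PySem.Str.isIn n line with
        | true => rfl
        | false => unfold pvCond at hcond; rw [hv] at hcond; simp at hcond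
      have hnotc : PySem.Str.isIn (n ++ "()") line = false := by
        cases hv : PySem.Str.isIn (n ++ "()") line with
        | false => rfl
        | true => unfold pvCond at hcond; rw [hv] at hcond; simp at hcond
      refine ⟨Or.inr ⟨hC.2 hmem, hfound.2 hin⟩, ?_⟩
      rintro (habs | ⟨_, hocc⟩)
      · exact hempty habs
      · rw [hcalled.1 hocc] at hnotc
        simp at hnotc
  · constructor
    · rintro ⟨(h | ⟨hc, _⟩), _⟩
      · exact absurd h hempty
      · exact absurd (hC.1 hc) hmem
    · intro h
      exact absurd (List.mem_filter.1 h).1 hmem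

theorem pv_referenced_isEmpty (ns : List String) (line : String) :
    (pvReferenced (PySem.Set.ofList ns) (pvLengths ns) line).isEmpty
      = (pvMatches ns line).isEmpty := by
  have h := pv_referenced_mem ns line
  cases h1 : (pvReferenced (PySem.Set.ofList ns) (pvLengths ns) line).isEmpty with
  | true =>
    have hnil := List.isEmpty_iff.1 h1
    cases h2 : (pvMatches ns line).isEmpty with
    | true => rfl
    | false =>
      obtain ⟨x, hx⟩ := List.exists_mem_of_ne_nil (pvMatches ns line) (by
        intro habs
        rw [habs] at h2
        simp at h2)
      exact absurd ((h x).2 hx) (by rw [hnil]; simp)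
  | false =>
    obtain ⟨x, hx⟩ := List.exists_mem_of_ne_nil
      (pvReferenced (PySem.Set.ofList ns) (pvLengths ns) line) (by
        intro habs
        rw [habs] at h1
        simp at h1)
    have hx' := (h x).1 hx
    cases h2 : (pvMatches ns line).isEmpty with
    | true =>
      rw [List.isEmpty_iff.1 h2] at hx'
      simp at hx'
    | false => rfl

-- B's loops, collapsed
-- B's loops, collapsed
theorem pv_alt_line_loop (ns : List String) (lines : List String)
    (joins kept : List String) :
    lines.foldl
      (fun (st2 : List String × List String) line =>
        if (pvReferenced (PySem.Set.ofList ns) (pvLengths ns) line).isEmpty then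
          (st2.1, st2.2 ++ [line])
        else (st2.1 ++ [line], st2.2))
      (joins, kept)
    = (joins ++ lines.filter (fun l => !(pvMatches ns l).isEmpty),
       kept ++ lines.filter (fun l => (pvMatches ns l).isEmpty)) := by
  induction lines generalizing joins kept with
  | nil => simp
  | cons line rest ih =>
    rw [List.foldl_cons, pv_referenced_isEmpty]
    cases h : (pvMatches ns line).isEmpty with
    | true => rw [if_pos rfl, ih]; simp [h, List.append_assoc]
    | false => rw [if_neg (by simp [h]), ih]; simp [h, List.append_assoc]

def pvAltStep (ns : List String) (st : List String × List String)
    (p : String × String) : List String × List String :=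
  let inner := (PySem.Str.splitlines p.2).foldl
    (fun (st2 : List String × List String) line =>
      if (pvReferenced (PySem.Set.ofList ns) (pvLengths ns) line).isEmpty then
        (st2.1, st2.2 ++ [line])
      else (st2.1 ++ [line], st2.2))
    (st.1, [])
  (inner.1, st.2 ++ ["subgraph " ++ p.1 ++ PySem.Str.join "\n" inner.2 ++ "\nend"])

theorem pv_alt_outer_loop (ns : List String) (todo : List (String × String))
    (joins subs : List String) :
    todo.foldl (pvAltStep ns) (joins, subs)
    = (joins ++ todo.flatMap (fun p =>
          (PySem.Str.splitlines p.2).filter (fun l => !(pvMatches ns l).isEmpty)),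
       subs ++ todo.map (fun p =>
          "subgraph " ++ p.1 ++ PySem.Str.join "\n"
            ((PySem.Str.splitlines p.2).filter (fun l => (pvMatches ns l).isEmpty)) ++
            "\nend")) := by
  induction todo generalizing joins subs with
  | nil => simp
  | cons p rest ih =>
    rw [List.foldl_cons]
    have hstep : pvAltStep ns (joins, subs) p
        = (joins ++ (PySem.Str.splitlines p.2).filter (fun l => !(pvMatches ns l).isEmpty),
           subs ++ ["subgraph " ++ p.1 ++ PySem.Str.join "\n"
             ((PySem.Str.splitlines p.2).filter (fun l => (pvMatches ns l).isEmpty)) ++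
             "\nend"]) := by
      unfold pvAltStep
      simp only [pv_alt_line_loop, List.nil_append]
    rw [hstep, ih]
    simp [List.append_assoc]

-- a matched-name list of length ≤ 1, mapped to the constant line, is the 0/1-element list
theorem pv_map_const_of_short (l : String) (xs : List String) (h : xs.length ≤ 1) :
    xs.map (fun _ => l) = if xs.isEmpty then [] else [l] := by
  match xs with
  | [] => simp
  | [x] => simp
  | x :: y :: rest => simp at h

-- turning a per-line flatMap of at most one copy into a filter
theorem pv_joins_line (ns : List String) (lines : List String)
    (h : ∀ l ∈ lines, (pvMatches ns l).length ≤ 1) :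
    lines.flatMap (fun l => (pvMatches ns l).map (fun _ => l))
      = lines.filter (fun l => !(pvMatches ns l).isEmpty) := by
  induction lines with
  | nil => simp
  | cons l rest ih =>
    rw [List.flatMap_cons, List.filter_cons]
    rw [pv_map_const_of_short l _ (h l (List.mem_cons_self ..))]
    rw [ih (fun x hx => h x (List.mem_cons_of_mem _ hx))]
    cases he : (pvMatches ns l).isEmpty with
    | true => simp
    | false => simp [he]

-- the two ports, in closed form
def pvJoinsA (m : List (String × String)) : List String :=
  m.flatMap (fun p => (PySem.Str.splitlines p.2).flatMap
    (fun l => (pvMatches (m.map Prod.fst) l).map (fun _ => l)))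

def pvJoinsB (m : List (String × String)) : List String :=
  m.flatMap (fun p => (PySem.Str.splitlines p.2).filter
    (fun l => !(pvMatches (m.map Prod.fst) l).isEmpty))

def pvSubs (m : List (String × String)) : List String :=
  m.map (fun p => "subgraph " ++ p.1 ++ PySem.Str.join "\n"
    ((PySem.Str.splitlines p.2).filter (fun l => (pvMatches (m.map Prod.fst) l).isEmpty))
    ++ "\nend")

theorem pv_A_eq (m : List (String × String)) (o : String)
    (hpre : (m.map Prod.fst).Nodup) :
    build_full_chart m o
      = "flowchart " ++ o ++ "\n" ++ PySem.Str.join "\n" (pvSubs m) ++ "\n"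
        ++ PySem.Str.join "\n" (pvJoinsA m) := by
  unfold build_full_chart
  simp only [pv_step_eq (m.map Prod.fst)]
  rw [pv_outer_loop (m.map Prod.fst) m PySem.Dict.empty []
        (by intro p _; exact PySem.Dict.contains_empty _) hpre]
  simp [pvSubs, pvJoinsA, PySem.Dict.empty, List.map_map, Function.comp_def,
    String.append_assoc]

theorem pv_B_eq (m : List (String × String)) (o : String) :
    build_full_chart_alt m o
      = "flowchart " ++ o ++ "\n" ++ PySem.Str.join "\n" (pvSubs m) ++ "\n"
        ++ PySem.Str.join "\n" (pvJoinsB m) := by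
  have halt : build_full_chart_alt m o
      = "flowchart " ++ o ++ "\n"
        ++ PySem.Str.join "\n" ((m.foldl (pvAltStep (m.map Prod.fst)) ([], [])).2)
        ++ "\n"
        ++ PySem.Str.join "\n" ((m.foldl (pvAltStep (m.map Prod.fst)) ([], [])).1) := rfl
  rw [halt, pv_alt_outer_loop]
  simp [pvSubs, pvJoinsB, String.append_assoc]

-- total character count of a list of strings
def pvCharSum (xs : List String) : Nat := (xs.map (fun s => s.toList.length)).sum

theorem pv_charSum_append (a b : List String) :
    pvCharSum (a ++ b) = pvCharSum a + pvCharSum b := by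
  simp [pvCharSum]

theorem pv_charSum_flatMap {α : Type} (l : List α) (f : α → List String) :
    pvCharSum (l.flatMap f) = (l.map (fun a => pvCharSum (f a))).sum := by
  induction l with
  | nil => simp [pvCharSum]
  | cons a rest ih => rw [List.flatMap_cons, pv_charSum_append, ih]; simp

theorem pv_join_len (parts : List String) :
    (PySem.Str.join "\n" parts).toList.length
      = pvCharSum parts + (parts.length - 1) := by
  induction parts with
  | nil =>
    rw [PySem.Str.toList_join]
    simp [PySem.Chars.join, pvCharSum, List.intercalate]
  | cons x ys ih =>
    cases ys with
    | nil =>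
      rw [PySem.Str.toList_join]
      simp [PySem.Chars.join, pvCharSum, List.intercalate]
    | cons y zs =>
      rw [PySem.Str.toList_join] at ih ⊢
      have hstep : PySem.Chars.join ("\n".toList) ((x :: y :: zs).map String.toList)
          = x.toList ++ ("\n".toList ++ PySem.Chars.join ("\n".toList) ((y :: zs).map String.toList)) := rfl
      rw [hstep]
      simp only [List.length_append] at ih ⊢
      simp only [pvCharSum, List.map_cons, List.sum_cons, List.length_cons] at ih ⊢
      have h1 : ("\n".toList).length = 1 := by decide
      omega

-- per-function comparison of the two join lists
theorem pv_tight_lines_le (ns : List String) (lines : List String) :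
    (lines.filter (fun l => !(pvMatches ns l).isEmpty)).length
        ≤ (lines.flatMap (fun l => (pvMatches ns l).map (fun _ => l))).length
    ∧ pvCharSum (lines.filter (fun l => !(pvMatches ns l).isEmpty))
        ≤ pvCharSum (lines.flatMap (fun l => (pvMatches ns l).map (fun _ => l))) := by
  induction lines with
  | nil => simp
  | cons l rest ih =>
    rw [List.filter_cons, List.flatMap_cons]
    obtain ⟨ih1, ih2⟩ := ih
    cases he : (pvMatches ns l).isEmpty with
    | true =>
      have hnil : pvMatches ns l = [] := List.isEmpty_iff.1 he
      constructor
      · simpa [hnil, he] using ih1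
      · simpa [hnil, he] using ih2
    | false =>
      have hpos : 1 ≤ (pvMatches ns l).length := by
        cases hm : pvMatches ns l with
        | nil => rw [hm] at he; simp at he
        | cons a b => simp [hm]
      constructor
      · simp only [he, Bool.not_false, if_pos, List.length_cons, List.length_append,
          List.length_map]
        omega
      · simp only [he, Bool.not_false, if_pos]
        rw [show (l :: rest.filter (fun l => !(pvMatches ns l).isEmpty))
              = [l] ++ rest.filter (fun l => !(pvMatches ns l).isEmpty) from rfl,
          pv_charSum_append, pv_charSum_append]
        have hrep : pvCharSum ((pvMatches ns l).map (fun _ => l))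
            = (pvMatches ns l).length * l.toList.length := by
          simp [pvCharSum, List.map_map, Function.comp_def, List.map_const',
            Nat.mul_comm]
        have hsing : pvCharSum [l] = l.toList.length := by simp [pvCharSum]
        rw [hrep, hsing]
        have : l.toList.length ≤ (pvMatches ns l).length * l.toList.length :=
          Nat.le_mul_of_pos_left _ hpos
        omega

theorem pv_tight_lines_lt (ns : List String) (lines : List String)
    (l0 : String) (hl0 : l0 ∈ lines) (h2 : 2 ≤ (pvMatches ns l0).length) :
    (lines.filter (fun l => !(pvMatches ns l).isEmpty)).length
      < (lines.flatMap (fun l => (pvMatches ns l).map (fun _ => l))).length := by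
  induction lines with
  | nil => simp at hl0
  | cons l rest ih =>
    rw [List.filter_cons, List.flatMap_cons]
    rcases List.mem_cons.1 hl0 with rfl | hmem
    · have he : (pvMatches ns l0).isEmpty = false := by
        cases hm : pvMatches ns l0 with
        | nil => rw [hm] at h2; simp at h2
        | cons a b => rfl
      have hrest := (pv_tight_lines_le ns rest).1
      simp only [he, Bool.not_false, if_pos, List.length_cons, List.length_append,
        List.length_map]
      omega
    · have hrest := ih hmem
      cases he : (pvMatches ns l).isEmpty with
      | true =>
        have : pvMatches ns l = [] := List.isEmpty_iff.1 he
        simpa [this, he] using hrest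
      | false =>
        have hpos : 1 ≤ (pvMatches ns l).length := by
          cases hm : pvMatches ns l with
          | nil => rw [hm] at he; simp at he
          | cons a b => simp [hm]
        simp only [he, Bool.not_false, if_pos, List.length_cons, List.length_append,
          List.length_map]
        omega

-- the outer comparison over the whole map
theorem pv_tight_outer (m : List (String × String))
    (p0 : String × String) (hp0 : p0 ∈ m) (l0 : String)
    (hl0 : l0 ∈ PySem.Str.splitlines p0.2)
    (h2 : 2 ≤ (pvMatches (m.map Prod.fst) l0).length) :
    (pvJoinsB m).length < (pvJoinsA m).length
    ∧ pvCharSum (pvJoinsB m) ≤ pvCharSum (pvJoinsA m)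
    ∧ 1 ≤ (pvJoinsB m).length := by
  have hBmem : l0 ∈ pvJoinsB m := by
    unfold pvJoinsB
    refine List.mem_flatMap.2 ⟨p0, hp0, ?_⟩
    refine List.mem_filter.2 ⟨hl0, ?_⟩
    cases hm : pvMatches (m.map Prod.fst) l0 with
    | nil => rw [hm] at h2; simp at h2
    | cons a b => rfl
  refine ⟨?_, ?_, List.length_pos_of_mem hBmem⟩
  · unfold pvJoinsA pvJoinsB
    rw [List.length_flatMap, List.length_flatMap]
    have hle : ∀ p ∈ m,
        ((PySem.Str.splitlines p.2).filter
          (fun l => !(pvMatches (m.map Prod.fst) l).isEmpty)).length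
        ≤ ((PySem.Str.splitlines p.2).flatMap
          (fun l => (pvMatches (m.map Prod.fst) l).map (fun _ => l))).length :=
      fun p _ => (pv_tight_lines_le (m.map Prod.fst) (PySem.Str.splitlines p.2)).1
    have hlt :
        ((PySem.Str.splitlines p0.2).filter
          (fun l => !(pvMatches (m.map Prod.fst) l).isEmpty)).length
        < ((PySem.Str.splitlines p0.2).flatMap
          (fun l => (pvMatches (m.map Prod.fst) l).map (fun _ => l))).length :=
      pv_tight_lines_lt (m.map Prod.fst) _ l0 hl0 h2
    exact List.sum_lt_sum _ _ hle ⟨p0, hp0, hlt⟩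
  · unfold pvJoinsA pvJoinsB
    rw [pv_charSum_flatMap, pv_charSum_flatMap]
    apply List.sum_le_sum
    intro p _
    exact (pv_tight_lines_le (m.map Prod.fst) (PySem.Str.splitlines p.2)).2

-- ===== VERDICT (by name: the statements are the Claim_ definitions above) =====
theorem build_full_chart_spec : Claim_unchanged_build_full_chart := by
  intro m o _hdom hpre
  unfold Spec_build_full_chart
  intro hD
  have hle : ∀ p ∈ m, ∀ l ∈ PySem.Str.splitlines p.2,
      (pvMatches (m.map Prod.fst) l).length ≤ 1 := by
    intro p hp l hl
    by_contra hgt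
    rw [Nat.not_le] at hgt
    exact hD ⟨p, hp, l, hl, hgt⟩
  have hjoins : pvJoinsA m = pvJoinsB m := by
    apply List.flatMap_congr
    intro p hp
    exact pv_joins_line _ _ (hle p hp)
  rw [pv_A_eq m o hpre, pv_B_eq m o, hjoins]

theorem build_full_chart_changed : Claim_changed_build_full_chart := by
  unfold Claim_changed_build_full_chart; decide

theorem build_full_chart_tight : Claim_exact_build_full_chart := by
  intro m o _hdom hpre hD
  unfold D_build_full_chart at hD
  obtain ⟨p0, hp0, l0, hl0, h2⟩ := hD
  have h2' : 2 ≤ (pvMatches (m.map Prod.fst) l0).length := h2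
  obtain ⟨hlt, hle, hpos⟩ := pv_tight_outer m p0 hp0 l0 hl0 h2'
  rw [pv_A_eq m o hpre, pv_B_eq m o]
  intro heq
  have hlen := congrArg (fun s => s.toList.length) heq
  simp only [String.toList_append, List.length_append, pv_join_len] at hlen
  omega
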